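-- pv_equiv track=rewrite | github.com/xy-xiaotudou/ESAE | fit.py | is_block
-- ===== SOURCE A (Python) =====
-- def is_block(layers_hp):
--     is_block = 'false'
--     i = -1
--     block_id = -1
--     for item in layers_hp:
--          i += 1
--          if len(item) == 3 and item[0] in ['a', 'b']:
--             block_id = i
--             break
--     if block_id == -1:
--         is_block = 'true'
--     else:
--         for j in range(block_id):
--             if len(layers_hp[j]) == 4:
--                 is_block = 'true'
--                 break
--     return is_block
-- ===== SOURCE B (Python) =====
-- def is_block(layers_hp):
--     seen_four = False
--     for item in layers_hp:
--         if len(item) == 3 and item[0] in ['a', 'b']: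
--             return 'true' if seen_four else 'false'
--         elif len(item) == 4:
--             seen_four = True
--     return 'true'
-- ===== Notes on version B (the rewrite author's own statement) =====
-- stated objective: simpler
-- what changed: Replaces A's find-the-block-index pass plus a second indexed rescan of the prefix with a single pass carrying a seen_four flag and early return, dropping the index/block_id bookkeeping.
import Mathlib
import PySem

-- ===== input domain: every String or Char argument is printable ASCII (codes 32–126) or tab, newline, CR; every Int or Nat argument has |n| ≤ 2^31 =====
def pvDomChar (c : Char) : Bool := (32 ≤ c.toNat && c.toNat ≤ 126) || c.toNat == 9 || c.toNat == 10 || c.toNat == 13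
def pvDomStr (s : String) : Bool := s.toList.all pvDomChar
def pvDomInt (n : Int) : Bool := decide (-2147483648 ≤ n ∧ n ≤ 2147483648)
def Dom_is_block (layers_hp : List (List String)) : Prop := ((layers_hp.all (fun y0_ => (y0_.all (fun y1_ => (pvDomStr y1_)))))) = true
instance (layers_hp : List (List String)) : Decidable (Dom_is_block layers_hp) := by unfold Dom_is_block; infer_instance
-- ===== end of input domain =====

-- B replaces A's find-index pass plus indexed rescan of the prefix by one pass with a seen_four flag (simpler; same asymptotic cost).

-- ===== PORT A =====
-- first loop: i starts at -1, is incremented, block_id := i at the break, stays -1 otherwise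
def pvFindBlock : List (List String) → Int → Int
  | [], _ => -1
  | item :: rest, i =>
    if item.length == 3 && (PySem.List.pyGet? item 0 == some "a" || PySem.List.pyGet? item 0 == some "b")
    then i + 1
    else pvFindBlock rest (i + 1)

-- second loop: for j in range(block_id): if len(layers_hp[j]) == 4: 'true'; break
def pvScan4 (full : List (List String)) : List Int → String
  | [] => "false"
  | j :: js =>
    match PySem.List.pyGet? full j with
    | some it => if it.length == 4 then "true" else pvScan4 full js
    | none => "false"   -- unreachable: every j in range(block_id) is a valid index

def is_block (layers_hp : List (List String)) : String :=
  let block_id := pvFindBlock layers_hp (-1)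
  if block_id == -1 then "true"
  else pvScan4 layers_hp (PySem.List.pyRange 0 block_id 1)

-- ===== PORT B =====
def pvChk : List (List String) → Bool → String
  | [], _ => "true"
  | item :: rest, seen_four =>
    if item.length == 3 && (PySem.List.pyGet? item 0 == some "a" || PySem.List.pyGet? item 0 == some "b")
    then (if seen_four then "true" else "false")
    else if item.length == 4 then pvChk rest true
    else pvChk rest seen_four

def is_block_alt (layers_hp : List (List String)) : String :=
  pvChk layers_hp false

-- ===== PRECONDITION & SPEC =====
def Spec_is_block (layers_hp : List (List String)) (out : String) : Prop := out = is_block_alt layers_hp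
instance (layers_hp : List (List String)) (out : String) : Decidable (Spec_is_block layers_hp out) := by unfold Spec_is_block; infer_instance

-- ===== CLAIM (what is proved, stated in full; the proofs are below) =====
def Claim_equal_is_block : Prop := ∀ (layers_hp : List (List String)), Dom_is_block layers_hp → Spec_is_block layers_hp (is_block layers_hp)

-- ===== LEMMAS AND PROOFS =====

def pvIsB (item : List String) : Bool :=
  item.length == 3 && (PySem.List.pyGet? item 0 == some "a" || PySem.List.pyGet? item 0 == some "b")

theorem pvFindBlock_char (l : List (List String)) : ∀ (i : Int),
    pvFindBlock l i = match l.findIdx? pvIsB with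
      | none => -1
      | some k => i + 1 + k := by
  induction l with
  | nil => intro i; simp [pvFindBlock]
  | cons x xs ih =>
    intro i
    simp only [pvFindBlock, List.findIdx?_cons, pvIsB]
    by_cases h : (x.length == 3 && (PySem.List.pyGet? x 0 == some "a" || PySem.List.pyGet? x 0 == some "b")) = true
    · simp [h]
    · rw [if_neg h, if_neg h, ih]
      cases hf : xs.findIdx? pvIsB with
      | none => simp
      | some k => simp only [Option.map_some]; push_cast; ring

theorem pvScan4_char (full : List (List String)) (n : Nat) : ∀ (a b : Nat),
    b - a = n → b ≤ full.length →
    pvScan4 full (PySem.List.pyRange a b 1) =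
      if ((full.take b).drop a).any (fun it => it.length == 4) then "true" else "false" := by
  induction n with
  | zero =>
    intro a b hab hb
    have hba : b ≤ a := by omega
    rw [PySem.List.pyRange_one_eq_nil (by exact_mod_cast hba)]
    have : (full.take b).drop a = [] := by
      apply List.drop_eq_nil_of_le
      simp; omega
    simp [pvScan4, this]
  | succ n ih =>
    intro a b hab hb
    have hlt : a < b := by omega
    rw [PySem.List.pyRange_one_cons (by exact_mod_cast hlt)]
    have halen : a < full.length := by omega
    have hget : PySem.List.pyGet? full (a : Int) = some full[a] := by
      simp [PySem.List.pyGet?, PySem.List.pyIdx?, halen]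
    have h1 : ((a : Int) + 1) = ((a + 1 : Nat) : Int) := by push_cast; ring
    have htl : (full.take b).drop a = full[a] :: (full.take b).drop (a + 1) := by
      rw [List.drop_eq_getElem_cons (by simp; omega)]
      congr 1
      exact List.getElem_take
    simp only [pvScan4, hget]
    by_cases h4 : (full[a].length == 4) = true
    · simp [h4, htl]
    · rw [if_neg h4, h1, ih (a + 1) b (by omega) hb, htl]
      simp [h4]

theorem pvChk_char (l : List (List String)) : ∀ (seen : Bool),
    pvChk l seen = match l.findIdx? pvIsB with
      | none => "true"
      | some k => if seen || (l.take k).any (fun it => it.length == 4) then "true" else "false" := by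
  induction l with
  | nil => intro seen; simp [pvChk]
  | cons x xs ih =>
    intro seen
    simp only [pvChk, List.findIdx?_cons, pvIsB]
    by_cases h : (x.length == 3 && (PySem.List.pyGet? x 0 == some "a" || PySem.List.pyGet? x 0 == some "b")) = true
    · simp only [if_pos h]
      cases seen <;> simp
    · rw [if_neg h, if_neg h]
      by_cases h4 : (x.length == 4) = true
      · rw [if_pos h4, ih]
        cases hf : xs.findIdx? pvIsB with
        | none => simp
        | some k => simp [h4]
      · rw [Bool.not_eq_true] at h4
        rw [if_neg (by simp [h4]), ih]
        cases hf : xs.findIdx? pvIsB with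
        | none => simp
        | some k => simp [h4]

theorem pv_main (l : List (List String)) : is_block l = is_block_alt l := by
  unfold is_block is_block_alt
  rw [pvFindBlock_char, pvChk_char]
  cases hf : l.findIdx? pvIsB with
  | none => simp
  | some k =>
    have hk : k < l.length := (List.findIdx?_eq_some_iff_findIdx_eq.mp hf).1
    have h0 : ((-1 : Int) + 1 + (k : Int)) = (k : Int) := by ring
    simp only [h0]
    rw [if_neg (by simp)]
    have hs := pvScan4_char l (k - 0) 0 k rfl (le_of_lt hk)
    simp only [Nat.cast_zero] at hs
    rw [hs]
    simp

-- ===== VERDICT (by name: the statement is the Claim_ definition above) =====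
theorem is_block_spec : Claim_equal_is_block := by
  intro l _
  unfold Spec_is_block
  exact pv_main l
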